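-- pv_equiv track=rewrite | github.com/famousyub/webscrapper | extractdatapdf.py | extract_email_from_resume_type
-- ===== SOURCE A (Python) =====
-- def extract_email_from_resume_type(text):
--     email = None
--
--     # Split the text into words
--     words = text.split()
--
--     # Iterate through the words and check for a potential email address
--     for word in words:
--         if "@" in word:
--             email = word.strip()
--             break
--
--     return email
-- ===== SOURCE B (Python) =====
-- def extract_email_from_resume_type(text):
--     # Single pass over the characters: keep the current whitespace-token prefix;
--     # at the first '@', extend to the end of the token and return it.
--     cur = ""
--     n = len(text)
--     for i, c in enumerate(text):
--         if c.isspace():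
--             cur = ""
--         elif c == '@':
--             j = i + 1
--             while j < n and not text[j].isspace():
--                 j += 1
--             return cur + text[i:j]
--         else:
--             cur += c
--     return None
-- ===== Notes on version B (the rewrite author's own statement) =====
-- stated objective: alternative
-- what changed: Replaces split-into-word-list-then-scan with a single character-level pass that tracks the current token prefix and, at the first at-sign, extends to the token end and returns immediately.
import Mathlib
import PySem

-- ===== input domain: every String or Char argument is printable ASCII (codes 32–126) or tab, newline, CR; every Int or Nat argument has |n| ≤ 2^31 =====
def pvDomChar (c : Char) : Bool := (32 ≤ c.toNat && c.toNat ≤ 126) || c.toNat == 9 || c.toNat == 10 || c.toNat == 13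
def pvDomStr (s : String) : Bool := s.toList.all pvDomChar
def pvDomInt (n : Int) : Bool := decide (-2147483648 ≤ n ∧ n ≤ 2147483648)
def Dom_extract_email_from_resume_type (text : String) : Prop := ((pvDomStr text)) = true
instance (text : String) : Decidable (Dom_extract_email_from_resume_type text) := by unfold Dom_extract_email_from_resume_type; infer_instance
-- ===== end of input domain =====

-- B: one character-level pass tracking the current token prefix instead of A's split-then-scan (objective: alternative).
-- ===== PORT A =====
-- for word in words: if "@" in word: return word.strip()  (break + return email)
def pvALoop : List (List Char) → Option (List Char)
  | [] => none
  | w :: ws => if PySem.Chars.isIn ['@'] w then some (PySem.Chars.strip w) else pvALoop ws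

def extract_email_from_resume_type (text : String) : Option String :=
  (pvALoop (PySem.Chars.split₀ text.toList)).map String.ofList

-- ===== PORT B =====
-- inner while of Source B: the remainder of the current token (chars up to the next whitespace)
def pvBRest : List Char → List Char
  | [] => []
  | c :: cs => if PySem.Chars.isspace c then [] else c :: pvBRest cs

-- the for-loop of Source B: cur is the current token prefix before position i
def pvBScan : List Char → List Char → Option (List Char)
  | [], _ => none
  | c :: cs, cur =>
    if PySem.Chars.isspace c then pvBScan cs []
    else if c = '@' then some (cur ++ '@' :: pvBRest cs)
    else pvBScan cs (cur ++ [c])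

def extract_email_from_resume_type_alt (text : String) : Option String :=
  (pvBScan text.toList []).map String.ofList

-- ===== PRECONDITION & SPEC =====
def Spec_extract_email_from_resume_type (text : String) (out : Option String) : Prop := out = extract_email_from_resume_type_alt text
instance (text : String) (out : Option String) : Decidable (Spec_extract_email_from_resume_type text out) := by unfold Spec_extract_email_from_resume_type; infer_instance

-- ===== CLAIM (what is proved, stated in full; the proofs are below) =====
def Claim_equal_extract_email_from_resume_type : Prop := ∀ (text : String), Dom_extract_email_from_resume_type text → Spec_extract_email_from_resume_type text (extract_email_from_resume_type text)

-- ===== LEMMAS AND PROOFS =====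

theorem pv_isIn_singleton (a : Char) (w : List Char) :
    PySem.Chars.isIn [a] w = true ↔ a ∈ w := by
  rw [PySem.Chars.isIn_iff_infix]; exact List.singleton_infix_iff a w

theorem pv_dropWhile_of_nospace (w : List Char) (h : ∀ c ∈ w, PySem.Chars.isspace c = false) :
    List.dropWhile PySem.Chars.isspace w = w := by
  cases w with
  | nil => rfl
  | cons c t => simp [h c (by simp)]

theorem pv_strip_of_nospace (w : List Char) (h : ∀ c ∈ w, PySem.Chars.isspace c = false) :
    PySem.Chars.strip w = w := by
  simp only [PySem.Chars.strip, PySem.Chars.lstrip, PySem.Chars.rstrip]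
  rw [pv_dropWhile_of_nospace w h,
      pv_dropWhile_of_nospace w.reverse (fun c hc => h c (List.mem_reverse.mp hc)),
      List.reverse_reverse]

theorem pv_go_acc (cs : List Char) (cur : List Char) (acc : List (List Char)) :
    PySem.Chars.split₀.go cs cur acc = acc.reverse ++ PySem.Chars.split₀.go cs cur [] := by
  induction cs generalizing cur acc with
  | nil => simp [PySem.Chars.split₀.go]; split_ifs <;> simp
  | cons c rest ih =>
    simp only [PySem.Chars.split₀.go]
    split_ifs with h1 h2
    · exact ih [] acc
    · rw [ih [] (cur.reverse :: acc), ih [] [cur.reverse]]; simp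
    · exact ih (c :: cur) acc

theorem pv_found (rest cur : List Char)
    (hcs : ∀ c ∈ cur, PySem.Chars.isspace c = false) (hat : '@' ∈ cur) :
    pvALoop (PySem.Chars.split₀.go rest cur []) = some (cur.reverse ++ pvBRest rest) := by
  have hin : PySem.Chars.isIn ['@'] cur.reverse = true :=
    (pv_isIn_singleton '@' cur.reverse).mpr (by simpa using hat)
  have hstrip : PySem.Chars.strip cur.reverse = cur.reverse :=
    pv_strip_of_nospace _ (fun x hx => hcs x (List.mem_reverse.mp hx))
  have hne : cur.isEmpty = false := by
    cases cur with
    | nil => simp at hat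
    | cons a b => simp
  induction rest generalizing cur with
  | nil =>
    simp [PySem.Chars.split₀.go, hne, pvALoop, pvBRest, hin, hstrip]
  | cons c r ih =>
    simp only [PySem.Chars.split₀.go]
    by_cases h1 : PySem.Chars.isspace c = true
    · simp only [h1, if_true, hne, Bool.false_eq_true, if_false]
      rw [pv_go_acc]
      simp [pvALoop, pvBRest, h1, hin, hstrip]
    · have hcf : PySem.Chars.isspace c = false := by simpa using h1
      have hcs' : ∀ x ∈ c :: cur, PySem.Chars.isspace x = false := by
        intro x hx
        rcases List.mem_cons.mp hx with h | h
        · subst h; exact hcf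
        · exact hcs x h
      rw [if_neg h1]
      rw [ih (c :: cur) hcs' (List.mem_cons_of_mem c hat)
            ((pv_isIn_singleton '@' (c :: cur).reverse).mpr (by simp [hat]))
            (pv_strip_of_nospace _ (fun x hx => hcs' x (List.mem_reverse.mp hx)))
            (by simp)]
      simp [pvBRest, hcf]

theorem pv_main (cs cur : List Char)
    (hcs : ∀ c ∈ cur, PySem.Chars.isspace c = false) (hat : '@' ∉ cur) :
    pvALoop (PySem.Chars.split₀.go cs cur []) = pvBScan cs cur.reverse := by
  have hin : PySem.Chars.isIn ['@'] cur.reverse = false := by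
    rw [Bool.eq_false_iff]
    intro hh
    exact hat (by simpa using (pv_isIn_singleton '@' cur.reverse).mp hh)
  induction cs generalizing cur with
  | nil =>
    simp only [PySem.Chars.split₀.go, pvBScan]
    split_ifs with h1
    · simp [pvALoop]
    · simp [pvALoop, hin]
  | cons c rest ih =>
    simp only [PySem.Chars.split₀.go, pvBScan]
    by_cases h1 : PySem.Chars.isspace c = true
    · simp only [h1, if_true]
      split_ifs with h2
      · simpa using ih [] (by simp) (by simp) (by decide)
      · rw [pv_go_acc]
        simpa [pvALoop, hin] using ih [] (by simp) (by simp) (by decide)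
    · have hcf : PySem.Chars.isspace c = false := by simpa using h1
      simp only [h1, if_false, Bool.false_eq_true]
      by_cases h3 : c = '@'
      · subst h3
        rw [pv_found rest ('@' :: cur)
              (by intro x hx
                  rcases List.mem_cons.mp hx with h | h
                  · subst h; exact hcf
                  · exact hcs x h)
              (by simp)]
        simp
      · simp only [h3, if_false]
        have hcs' : ∀ x ∈ c :: cur, PySem.Chars.isspace x = false := by
          intro x hx
          rcases List.mem_cons.mp hx with h | h
          · subst h; exact hcf
          · exact hcs x h
        have hat' : '@' ∉ c :: cur := by
          intro hx
          rcases List.mem_cons.mp hx with h | h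
          · exact h3 h.symm
          · exact hat h
        have hin' : PySem.Chars.isIn ['@'] (c :: cur).reverse = false := by
          rw [Bool.eq_false_iff]
          intro hh
          exact hat' (List.mem_reverse.mp ((pv_isIn_singleton '@' (c :: cur).reverse).mp hh))
        rw [ih (c :: cur) hcs' hat' hin']
        simp

-- ===== VERDICT (by name: the statement is the Claim_ definition above) =====
theorem extract_email_from_resume_type_spec : Claim_equal_extract_email_from_resume_type := by
  intro text _
  unfold Spec_extract_email_from_resume_type extract_email_from_resume_type extract_email_from_resume_type_alt
  rw [show PySem.Chars.split₀ text.toList = PySem.Chars.split₀.go text.toList [] [] from rfl,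
      pv_main text.toList [] (by simp) (by simp)]
  simp
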